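-- pv_equiv track=rewrite | github.com/abhijit-ubale/syda | syda/validators.py | _find_similar_field_names
-- ===== SOURCE A (Python) =====
-- from typing import Dict, List, Tuple, Any, Set, Optional
--
-- def _find_similar_field_names(target: str, candidates: Any, max_results: int = 2) -> List[str]:
--     """Find similar field names for suggestions."""
--     candidates = [c for c in candidates if not c.startswith('__')]
--     target_lower = target.lower()
--
--     # Exact case-insensitive match
--     exact_matches = [c for c in candidates if c.lower() == target_lower]
--     if exact_matches:
--         return exact_matches[:max_results]
--
--     # Substring matches
--     substring_matches = [c for c in candidates if target_lower in c.lower() or c.lower() in target_lower]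
--     return substring_matches[:max_results]
-- ===== SOURCE B (Python) =====
-- from typing import List, Any
--
-- def _find_similar_field_names(target: str, candidates: Any, max_results: int = 2) -> List[str]:
--     """Score each candidate (0 = exact, 1 = substring, 2 = irrelevant; dunders are
--     always 2), pick the best score with min(), then keep that tier only."""
--     tl = target.lower()
--
--     def rank(c: str) -> int:
--         if c.startswith('__'):
--             return 2
--         cl = c.lower()
--         if cl == tl:
--             return 0
--         return 1 if (tl in cl or cl in tl) else 2
--
--     ranks = [rank(c) for c in candidates]
--     best = min(ranks, default=2)
--     if best == 2:
--         return []
--     return [c for c, r in zip(candidates, ranks) if r == best][:max_results]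
-- ===== Notes on version B (the rewrite author's own statement) =====
-- stated objective: alternative
-- what changed: Replaces A's cascading filter passes with fallback (exact list, else substring list) by a scoring algorithm: every candidate gets a relevance rank (0 exact, 1 substring, 2 irrelevant, dunders always 2), min() finds the best rank present, and one filter keeps exactly that tier before truncation.
import Mathlib
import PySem

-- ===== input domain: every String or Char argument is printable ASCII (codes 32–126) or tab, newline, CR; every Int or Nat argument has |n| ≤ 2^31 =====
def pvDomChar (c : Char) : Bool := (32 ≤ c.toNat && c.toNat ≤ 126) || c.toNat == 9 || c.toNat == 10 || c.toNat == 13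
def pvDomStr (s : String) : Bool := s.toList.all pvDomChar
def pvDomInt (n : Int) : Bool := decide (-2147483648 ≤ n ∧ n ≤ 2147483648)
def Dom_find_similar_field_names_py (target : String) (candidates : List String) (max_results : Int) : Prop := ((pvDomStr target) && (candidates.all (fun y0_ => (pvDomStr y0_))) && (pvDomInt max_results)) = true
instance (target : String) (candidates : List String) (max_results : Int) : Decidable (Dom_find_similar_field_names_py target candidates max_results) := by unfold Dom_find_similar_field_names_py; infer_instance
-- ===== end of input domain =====

-- B replaces A's cascading filter passes with a scoring algorithm (rank each candidate 0/1/2, min-select the best tier); same cost, different algorithm.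
-- ===== PORT A =====
def find_similar_field_names_py (target : String) (candidates : List String) (max_results : Int) : List String :=
  let candidates := candidates.filter (fun c => !(PySem.Str.startswith c "__"))
  let target_lower := PySem.Str.lower target
  let exact_matches := candidates.filter (fun c => PySem.Str.lower c == target_lower)
  if !exact_matches.isEmpty then
    PySem.List.slice exact_matches none (some max_results)
  else
    let substring_matches := candidates.filter (fun c =>
      PySem.Str.isIn target_lower (PySem.Str.lower c) || PySem.Str.isIn (PySem.Str.lower c) target_lower)
    PySem.List.slice substring_matches none (some max_results)

-- ===== PORT B =====
-- B's helper rank: 0 = exact, 1 = substring, 2 = irrelevant (dunders always 2)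
def pvRank (tl : String) (c : String) : Int :=
  if PySem.Str.startswith c "__" then 2
  else
    let cl := PySem.Str.lower c
    if cl == tl then 0
    else if PySem.Str.isIn tl cl || PySem.Str.isIn cl tl then 1 else 2

def find_similar_field_names_py_alt (target : String) (candidates : List String) (max_results : Int) : List String :=
  let tl := PySem.Str.lower target
  let ranks := candidates.map (pvRank tl)
  let best := PySem.List.minD ranks (fun x => x) 2
  if best == 2 then []
  else PySem.List.slice (((candidates.zip ranks).filter (fun p => p.2 == best)).map (fun p => p.1)) none (some max_results)

-- ===== PRECONDITION & SPEC =====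
def Spec_find_similar_field_names_py (target : String) (candidates : List String) (max_results : Int) (out : List String) : Prop := out = find_similar_field_names_py_alt target candidates max_results
instance (target : String) (candidates : List String) (max_results : Int) (out : List String) : Decidable (Spec_find_similar_field_names_py target candidates max_results out) := by unfold Spec_find_similar_field_names_py; infer_instance

-- ===== CLAIM (what is proved, stated in full; the proofs are below) =====
def Claim_equal_find_similar_field_names_py : Prop := ∀ (target : String) (candidates : List String) (max_results : Int), Dom_find_similar_field_names_py target candidates max_results → Spec_find_similar_field_names_py target candidates max_results (find_similar_field_names_py target candidates max_results)

-- ===== LEMMAS AND PROOFS =====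

theorem pv_rank_def (tl c : String) : pvRank tl c =
    if PySem.Str.startswith c "__" then 2
    else if PySem.Str.lower c == tl then 0
    else if PySem.Str.isIn tl (PySem.Str.lower c) || PySem.Str.isIn (PySem.Str.lower c) tl then 1
    else 2 := rfl

theorem pv_rank_eq_zero_iff (tl c : String) :
    pvRank tl c = 0 ↔ (PySem.Str.startswith c "__" = false ∧ (PySem.Str.lower c == tl) = true) := by
  rw [pv_rank_def]; split_ifs <;> simp_all

theorem pv_rank_eq_one_iff (tl c : String) :
    pvRank tl c = 1 ↔ (PySem.Str.startswith c "__" = false ∧ (PySem.Str.lower c == tl) = false ∧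
      (PySem.Str.isIn tl (PySem.Str.lower c) || PySem.Str.isIn (PySem.Str.lower c) tl) = true) := by
  rw [pv_rank_def]; split_ifs <;> simp_all

theorem pv_rank_nonneg (tl c : String) : 0 ≤ pvRank tl c := by
  rw [pv_rank_def]; split_ifs <;> norm_num

theorem pv_rank_cases (tl c : String) : pvRank tl c = 0 ∨ pvRank tl c = 1 ∨ pvRank tl c = 2 := by
  rw [pv_rank_def]; split_ifs <;> simp

-- B's '[c for c, r in zip(candidates, ranks) if r == best]' with ranks = map rank is a filter on the rank
theorem pv_zip_map_filter {α : Type} (f : α → Int) (q : Int → Bool) (l : List α) :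
    (((l.zip (l.map f)).filter (fun p => q p.2)).map (fun p => p.1)) = l.filter (fun c => q (f c)) := by
  induction l with
  | nil => rfl
  | cons x xs ih => by_cases h : q (f x) <;> simp [h, ih]

-- ===== VERDICT (by name: the statement is the Claim_ definition above) =====
theorem find_similar_field_names_py_spec : Claim_equal_find_similar_field_names_py := by
  intro target candidates max_results _
  unfold Spec_find_similar_field_names_py find_similar_field_names_py find_similar_field_names_py_alt
  dsimp only
  set tl := PySem.Str.lower target with htl
  by_cases hE : ((candidates.filter (fun c => !(PySem.Str.startswith c "__"))).filter
      (fun c => PySem.Str.lower c == tl)) = []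
  · -- no exact matches
    have hnot0 : ∀ c ∈ candidates, pvRank tl c ≠ 0 := by
      intro c hc h0
      obtain ⟨hsw, hlo⟩ := (pv_rank_eq_zero_iff tl c).mp h0
      have hmem : c ∈ ((candidates.filter (fun c => !(PySem.Str.startswith c "__"))).filter
          (fun c => PySem.Str.lower c == tl)) := by
        simp only [List.mem_filter]
        exact ⟨⟨hc, by simpa using hsw⟩, hlo⟩
      rw [hE] at hmem
      exact absurd hmem (List.not_mem_nil)
    rw [if_neg (by rw [hE]; decide)]
    by_cases hS : ((candidates.filter (fun c => !(PySem.Str.startswith c "__"))).filter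
        (fun c => PySem.Str.isIn tl (PySem.Str.lower c) || PySem.Str.isIn (PySem.Str.lower c) tl)) = []
    · -- nothing matches at all: every rank is 2, B returns []
      have hnot1 : ∀ c ∈ candidates, pvRank tl c ≠ 1 := by
        intro c hc h1
        obtain ⟨hsw, _, hsub⟩ := (pv_rank_eq_one_iff tl c).mp h1
        have hmem : c ∈ ((candidates.filter (fun c => !(PySem.Str.startswith c "__"))).filter
            (fun c => PySem.Str.isIn tl (PySem.Str.lower c) || PySem.Str.isIn (PySem.Str.lower c) tl)) := by
          simp only [List.mem_filter]
          exact ⟨⟨hc, by simpa using hsw⟩, hsub⟩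
        rw [hS] at hmem
        exact absurd hmem (List.not_mem_nil)
      have hbest : PySem.List.minD (candidates.map (pvRank tl)) (fun x => x) 2 = 2 := by
        unfold PySem.List.minD
        cases hm : PySem.List.min? (candidates.map (pvRank tl)) (fun x => x) with
        | none => rfl
        | some m =>
          have hmem := PySem.List.min?_mem hm
          obtain ⟨c, hc, hmc⟩ := List.mem_map.mp hmem
          rcases pv_rank_cases tl c with h | h | h
          · exact absurd h (hnot0 c hc)
          · exact absurd h (hnot1 c hc)
          · rw [Option.getD_some, ← hmc, h]
      rw [hS, hbest]
      simp [PySem.List.slice]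
    · -- substring matches exist: best = 1 and B's tier-1 filter is A's substring list
      obtain ⟨c1, hc1⟩ := List.exists_mem_of_ne_nil _ hS
      simp only [List.mem_filter] at hc1
      obtain ⟨⟨hc1m, hc1sw⟩, hc1sub⟩ := hc1
      have hc1sw' : PySem.Str.startswith c1 "__" = false := by simpa using hc1sw
      have hc1lo : (PySem.Str.lower c1 == tl) = false := by
        by_contra h
        exact hnot0 c1 hc1m ((pv_rank_eq_zero_iff tl c1).mpr ⟨hc1sw', by simpa using h⟩)
      have hr1 : pvRank tl c1 = 1 := (pv_rank_eq_one_iff tl c1).mpr ⟨hc1sw', hc1lo, hc1sub⟩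
      have hbest : PySem.List.minD (candidates.map (pvRank tl)) (fun x => x) 2 = 1 := by
        unfold PySem.List.minD
        cases hm : PySem.List.min? (candidates.map (pvRank tl)) (fun x => x) with
        | none =>
          have : candidates.map (pvRank tl) = [] := (PySem.List.min?_eq_none_iff _ _).mp hm
          rw [List.map_eq_nil_iff] at this
          rw [this] at hc1m
          exact absurd hc1m (List.not_mem_nil)
        | some m =>
          have hle := PySem.List.min?_isMin hm _ (List.mem_map_of_mem (f := pvRank tl) hc1m)
          rw [hr1] at hle
          have hmem := PySem.List.min?_mem hm
          obtain ⟨c, hc, hmc⟩ := List.mem_map.mp hmem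
          have h1le : (1 : Int) ≤ m := by
            rcases pv_rank_cases tl c with h | h | h
            · exact absurd h (hnot0 c hc)
            · rw [← hmc, h]
            · rw [← hmc, h]; norm_num
          have hm1 : m = 1 := le_antisymm hle h1le
          rw [Option.getD_some, hm1]
      rw [hbest, if_neg (by decide)]
      congr 1
      rw [pv_zip_map_filter (pvRank tl) (fun r => r == 1) candidates, List.filter_filter]
      refine List.filter_congr ?_
      intro c hc
      rcases h1 : PySem.Str.startswith c "__" with _ | _ <;>
        rcases h2 : (PySem.Str.lower c == tl) with _ | _ <;>
        rcases h3 : (PySem.Str.isIn tl (PySem.Str.lower c) || PySem.Str.isIn (PySem.Str.lower c) tl) with _ | _ <;>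
        simp only [pv_rank_def, h1, h2, h3] <;>
        first
          | decide
          | exact absurd ((pv_rank_eq_zero_iff tl c).mpr ⟨h1, h2⟩) (hnot0 c hc)
  · -- exact matches exist: best = 0 and B's tier-0 filter is A's exact list
    rw [if_pos (by rw [List.isEmpty_eq_false_iff.mpr hE]; rfl)]
    obtain ⟨c0, hc0⟩ := List.exists_mem_of_ne_nil _ hE
    simp only [List.mem_filter] at hc0
    obtain ⟨⟨hc0m, hc0sw⟩, hc0lo⟩ := hc0
    have hc0sw' : PySem.Str.startswith c0 "__" = false := by simpa using hc0sw
    have hr0 : pvRank tl c0 = 0 := (pv_rank_eq_zero_iff tl c0).mpr ⟨hc0sw', hc0lo⟩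
    have hbest : PySem.List.minD (candidates.map (pvRank tl)) (fun x => x) 2 = 0 := by
      unfold PySem.List.minD
      cases hm : PySem.List.min? (candidates.map (pvRank tl)) (fun x => x) with
      | none =>
        have : candidates.map (pvRank tl) = [] := (PySem.List.min?_eq_none_iff _ _).mp hm
        rw [List.map_eq_nil_iff] at this
        rw [this] at hc0m
        exact absurd hc0m (List.not_mem_nil)
      | some m =>
        have hle := PySem.List.min?_isMin hm _ (List.mem_map_of_mem (f := pvRank tl) hc0m)
        rw [hr0] at hle
        have hmem := PySem.List.min?_mem hm
        obtain ⟨c, hc, hmc⟩ := List.mem_map.mp hmem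
        have h0le : (0 : Int) ≤ m := hmc ▸ pv_rank_nonneg tl c
        have hm0 : m = 0 := le_antisymm hle h0le
        rw [Option.getD_some, hm0]
    rw [hbest, if_neg (by decide)]
    congr 1
    rw [pv_zip_map_filter (pvRank tl) (fun r => r == 0) candidates, List.filter_filter]
    refine List.filter_congr ?_
    intro c hc
    rcases h1 : PySem.Str.startswith c "__" with _ | _ <;>
      rcases h2 : (PySem.Str.lower c == tl) with _ | _ <;>
      rcases h3 : (PySem.Str.isIn tl (PySem.Str.lower c) || PySem.Str.isIn (PySem.Str.lower c) tl) with _ | _ <;>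
      simp only [pv_rank_def, h1, h2, h3] <;>
      decide
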